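-- pv_equiv track=rewrite | github.com/olsenw/LeetCodeExercises | Python3/count_the_number_of_good_subarrays.py | countGood_brute
-- ===== SOURCE A (Python) =====
-- from collections import Counter
-- from typing import List, Dict, Set, Optional
--
-- def countGood_brute(nums: List[int], k: int) -> int:
--     n = len(nums)
--     answer = 0
--     for i in range(n):
--         c = Counter()
--         pairs = 0
--         for j in range(i, n):
--             c[nums[j]] += 1
--             pairs += c[nums[j]] - 1
--             if pairs >= k:
--                 answer += 1
--     return answer
-- ===== SOURCE B (Python) =====
-- from collections import Counter
--
-- def countGood_brute(nums, k):
--     # Sliding window: for each right, shrink from the left while the window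
--     # still has >= k equal pairs; each shrink step accounts for all extensions.
--     n = len(nums)
--     cnt = Counter()
--     pairs = 0
--     left = 0
--     answer = 0
--     for right in range(n):
--         x = nums[right]
--         pairs += cnt[x]
--         cnt[x] += 1
--         while pairs >= k and left <= right:
--             answer += n - right
--             y = nums[left]
--             cnt[y] -= 1
--             pairs -= cnt[y]
--             left += 1
--     return answer
-- ===== Notes on version B (the rewrite author's own statement) =====
-- stated objective: faster
-- what changed: Replaces A's O(n^2) per-start rescan (a fresh Counter and inner loop for every start index) by a single sliding-window two-pointer pass that maintains the pair count incrementally and, each time the window still has >= k pairs after adding nums[right], credits all n - right extensions while shrinking from the left.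
import Mathlib
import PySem

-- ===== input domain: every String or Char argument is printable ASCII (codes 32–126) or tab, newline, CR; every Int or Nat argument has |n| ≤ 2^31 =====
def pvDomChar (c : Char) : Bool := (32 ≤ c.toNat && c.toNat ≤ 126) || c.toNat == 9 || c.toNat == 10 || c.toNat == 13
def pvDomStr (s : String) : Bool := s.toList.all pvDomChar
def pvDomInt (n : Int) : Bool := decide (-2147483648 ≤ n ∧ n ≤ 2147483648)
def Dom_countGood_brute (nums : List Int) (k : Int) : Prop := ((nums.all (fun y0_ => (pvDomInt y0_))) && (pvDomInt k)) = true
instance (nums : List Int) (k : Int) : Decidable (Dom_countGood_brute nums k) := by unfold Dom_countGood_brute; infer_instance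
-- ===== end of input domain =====

-- B replaces A's quadratic per-start rescan by a single sliding-window two-pointer pass; the equivalence below is exact on all inputs.

-- ===== PORT A =====
-- inner loop body of A: c[nums[j]] += 1; pairs += c[nums[j]] - 1; if pairs >= k: answer += 1
def countGoodInner (nums : List Int) (k : Int)
    (st : PySem.Dict Int Int × Int × Int) (j : Int) : PySem.Dict Int Int × Int × Int :=
  let x := PySem.List.pyGetD nums j 0
  let c := st.1.insert x (st.1.getD x 0 + 1)
  let pairs := st.2.1 + (c.getD x 0 - 1)
  (c, pairs, if pairs ≥ k then st.2.2 + 1 else st.2.2)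

def countGood_brute (nums : List Int) (k : Int) : Int :=
  let n : Int := PySem.List.len nums
  (PySem.List.pyRange 0 n 1).foldl (fun answer i =>
    ((PySem.List.pyRange i n 1).foldl (countGoodInner nums k)
      (PySem.Dict.empty, 0, answer)).2.2) 0

-- ===== PORT B =====
-- the 'while pairs >= k and left <= right' loop of B (fuel-bounded; fuel n+1 always suffices since left increases)
def shrinkB (nums : List Int) (k n right : Int) :
    Nat → PySem.Dict Int Int × Int × Int × Int → PySem.Dict Int Int × Int × Int × Int
  | 0, st => st
  | fuel+1, st =>
    if st.2.1 ≥ k ∧ st.2.2.1 ≤ right then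
      let ans := st.2.2.2 + (n - right)
      let y := PySem.List.pyGetD nums st.2.2.1 0
      let cnt := st.1.insert y (st.1.getD y 0 - 1)
      let pairs := st.2.1 - cnt.getD y 0
      shrinkB nums k n right fuel (cnt, pairs, st.2.2.1 + 1, ans)
    else st

-- body of B's for-loop: x = nums[right]; pairs += cnt[x]; cnt[x] += 1; then shrink from the left
def bStep (nums : List Int) (k : Int)
    (st : PySem.Dict Int Int × Int × Int × Int) (right : Int) :
    PySem.Dict Int Int × Int × Int × Int :=
  let n : Int := PySem.List.len nums
  let x := PySem.List.pyGetD nums right 0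
  let pairs := st.2.1 + st.1.getD x 0
  let cnt := st.1.insert x (st.1.getD x 0 + 1)
  shrinkB nums k n right (n.toNat + 1) (cnt, pairs, st.2.2.1, st.2.2.2)

def countGood_brute_alt (nums : List Int) (k : Int) : Int :=
  let n : Int := PySem.List.len nums
  ((PySem.List.pyRange 0 n 1).foldl (bStep nums k)
    (PySem.Dict.empty, 0, 0, 0)).2.2.2

-- ===== PRECONDITION & SPEC =====
def Spec_countGood_brute (nums : List Int) (k : Int) (out : Int) : Prop := out = countGood_brute_alt nums k
instance (nums : List Int) (k : Int) (out : Int) : Decidable (Spec_countGood_brute nums k out) := by unfold Spec_countGood_brute; infer_instance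

-- ===== CLAIM (what is proved, stated in full; the proofs are below) =====
def Claim_equal_countGood_brute : Prop := ∀ (nums : List Int) (k : Int), Dom_countGood_brute nums k → Spec_countGood_brute nums k (countGood_brute nums k)

-- ===== LEMMAS AND PROOFS =====

-- the window nums[l:r]
def pvSeg (nums : List Int) (l r : Nat) : List Int := (nums.take r).drop l

-- number of equal-element pairs in a list
def pvPairs : List Int → Int
  | [] => 0
  | x :: t => (t.count x : Int) + pvPairs t

-- number of r with l ≤ r < n such that nums[l..r] has at least k pairs
def pvGoodCnt (nums : List Int) (k : Int) (l : Nat) : Int :=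
  ((List.range' l (nums.length - l)).countP
    (fun r => decide (k ≤ pvPairs (pvSeg nums l (r+1)))) : Int)

def pvSum (nums : List Int) (k : Int) (L : Nat) : Int :=
  ((List.range L).map (pvGoodCnt nums k)).sum

lemma pvPairs_nonneg (l : List Int) : 0 ≤ pvPairs l := by
  induction l with
  | nil => simp [pvPairs]
  | cons x t ih => simp only [pvPairs]; positivity

lemma pvPairs_concat (t : List Int) (x : Int) :
    pvPairs (t ++ [x]) = pvPairs t + (t.count x : Int) := by
  induction t with
  | nil => simp [pvPairs]
  | cons a t ih =>
    simp only [List.cons_append, pvPairs, ih, List.count_append, List.count_cons, List.count_nil]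
    by_cases h : a = x
    · subst h; simp; ring
    · have h' : ¬ (x = a) := fun hh => h hh.symm
      simp [h, h']; ring

lemma pvPairs_prefix_le (u v : List Int) : pvPairs u ≤ pvPairs (u ++ v) := by
  induction v using List.reverseRecOn with
  | nil => simp
  | append_singleton w a ih =>
    rw [← List.append_assoc, pvPairs_concat]
    have : (0:Int) ≤ ((u ++ w).count a : Int) := by positivity
    omega

lemma pvPairs_drop_le (d : Nat) (l : List Int) : pvPairs (l.drop d) ≤ pvPairs l := by
  induction l generalizing d with
  | nil => simp
  | cons x t ih =>
    cases d with
    | zero => simp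
    | succ d =>
      have h1 : pvPairs ((x :: t).drop (d+1)) = pvPairs (t.drop d) := by simp
      have h2 : pvPairs t ≤ pvPairs (x :: t) := by
        simp only [pvPairs]
        have : (0:Int) ≤ (t.count x : Int) := by positivity
        omega
      calc pvPairs ((x :: t).drop (d+1)) = pvPairs (t.drop d) := h1
        _ ≤ pvPairs t := ih d
        _ ≤ pvPairs (x :: t) := h2

lemma pvSeg_nil (nums : List Int) {l r : Nat} (h : nums.length ≤ l ∨ r ≤ l) :
    pvSeg nums l r = [] := by
  apply List.drop_eq_nil_of_le
  rw [List.length_take]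
  omega

lemma pvSeg_concat (nums : List Int) {l r : Nat} (hlr : l ≤ r) (hr : r < nums.length) :
    pvSeg nums l (r+1) = pvSeg nums l r ++ [nums.getD r 0] := by
  unfold pvSeg
  have ht : nums.take (r+1) = nums.take r ++ [nums.getD r 0] := by
    rw [List.take_add_one, List.getElem?_eq_getElem hr, List.getD_eq_getElem nums 0 hr]
    rfl
  rw [ht, List.drop_append_of_le_length]
  rw [List.length_take]; omega

lemma pvSeg_cons (nums : List Int) {l r : Nat} (hlr : l < r) (hl : l < nums.length) :
    pvSeg nums l r = nums.getD l 0 :: pvSeg nums (l+1) r := by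
  unfold pvSeg
  have hlt : l < (nums.take r).length := by rw [List.length_take]; omega
  rw [List.drop_eq_getElem_cons hlt, List.getElem_take, List.getD_eq_getElem nums 0 hl]

lemma pvPairs_seg_mono (nums : List Int) {l r r' : Nat} (h : r ≤ r') :
    pvPairs (pvSeg nums l r) ≤ pvPairs (pvSeg nums l r') := by
  by_cases hl : (nums.take r).length ≤ l
  · have : pvSeg nums l r = [] := List.drop_eq_nil_of_le hl
    rw [this]
    exact pvPairs_nonneg _
  · push Not at hl
    have hsplit : nums.take r' = nums.take r ++ ((nums.take r').drop r) := by
      conv_lhs => rw [← List.take_append_drop r (nums.take r')]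
      congr 1
      rw [List.take_take]
      congr 1
      omega
    unfold pvSeg
    rw [hsplit, List.drop_append_of_le_length (le_of_lt hl)]
    exact pvPairs_prefix_le _ _

lemma pvPairs_seg_anti (nums : List Int) {l l' r : Nat} (h : l ≤ l') :
    pvPairs (pvSeg nums l' r) ≤ pvPairs (pvSeg nums l r) := by
  have : pvSeg nums l' r = (pvSeg nums l r).drop (l' - l) := by
    unfold pvSeg
    rw [List.drop_drop]
    congr 1
    omega
  rw [this]
  exact pvPairs_drop_le _ _

lemma pvGoodCnt_eq (nums : List Int) (k : Int) {L r : Nat} (hLr : L ≤ r) (hr : r < nums.length)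
    (hgood : k ≤ pvPairs (pvSeg nums L (r+1)))
    (hbad : ∀ j, L ≤ j → j < r → pvPairs (pvSeg nums L (j+1)) < k) :
    pvGoodCnt nums k L = (nums.length : Int) - (r : Int) := by
  unfold pvGoodCnt
  have hsplit : List.range' L (nums.length - L) =
      List.range' L (r - L) ++ List.range' r (nums.length - r) := by
    have h2 : (r - L) + (nums.length - r) = nums.length - L := by omega
    have h1 : L + (r - L) = r := by omega
    rw [← h2, ← List.range'_append_1, h1]
  rw [hsplit, List.countP_append]
  have c1 : (List.range' L (r - L)).countP (fun j => decide (k ≤ pvPairs (pvSeg nums L (j+1)))) = 0 := by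
    rw [List.countP_eq_zero]
    intro j hj
    rw [List.mem_range'_1] at hj
    simp only [decide_eq_true_eq]
    push Not
    exact hbad j hj.1 (by omega)
  have c2 : (List.range' r (nums.length - r)).countP (fun j => decide (k ≤ pvPairs (pvSeg nums L (j+1)))) = nums.length - r := by
    have := (List.countP_eq_length (l := List.range' r (nums.length - r)) (p := fun j => decide (k ≤ pvPairs (pvSeg nums L (j+1))))).2 ?_
    · rw [this, List.length_range']
    · intro j hj
      rw [List.mem_range'_1] at hj
      simp only [decide_eq_true_eq]
      exact le_trans hgood (pvPairs_seg_mono nums (by omega))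
  rw [c1, c2]
  omega

lemma pvGoodCnt_zero (nums : List Int) (k : Int) {L l : Nat} (hl : L ≤ l)
    (h : ∀ j, L ≤ j → j < nums.length → pvPairs (pvSeg nums L (j+1)) < k) :
    pvGoodCnt nums k l = 0 := by
  unfold pvGoodCnt
  have : (List.range' l (nums.length - l)).countP (fun j => decide (k ≤ pvPairs (pvSeg nums l (j+1)))) = 0 := by
    rw [List.countP_eq_zero]
    intro j hj
    rw [List.mem_range'_1] at hj
    simp only [decide_eq_true_eq]
    push Not
    calc pvPairs (pvSeg nums l (j+1)) ≤ pvPairs (pvSeg nums L (j+1)) := pvPairs_seg_anti nums hl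
      _ < k := h j (by omega) (by omega)
  rw [this]
  rfl

lemma pvSum_succ (nums : List Int) (k : Int) (L : Nat) :
    pvSum nums k (L+1) = pvSum nums k L + pvGoodCnt nums k L := by
  unfold pvSum
  rw [List.range_succ]
  simp

lemma pvSum_stable (nums : List Int) (k : Int) {L : Nat} (hL : L ≤ nums.length)
    (h : ∀ j, L ≤ j → j < nums.length → pvPairs (pvSeg nums L (j+1)) < k) :
    pvSum nums k nums.length = pvSum nums k L := by
  have key : ∀ M, L ≤ M → M ≤ nums.length → pvSum nums k M = pvSum nums k L := by
    intro M hLM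
    induction M, hLM using Nat.le_induction with
    | base => intro _; rfl
    | succ M hLM ih =>
      intro hM
      rw [pvSum_succ, ih (by omega), pvGoodCnt_zero nums k hLM h]
      ring
  exact key _ hL le_rfl

lemma count_insert_step (c : PySem.Dict Int Int) (s : List Int) (x : Int)
    (h : ∀ v, c.getD v 0 = (s.count v : Int)) :
    ∀ v, (c.insert x (c.getD x 0 + 1)).getD v 0 = ((s ++ [x]).count v : Int) := by
  intro v
  rw [PySem.Dict.getD_insert]
  by_cases hv : v = x
  · subst hv
    simp [h v, List.count_append]
  · simp [hv, h v, List.count_append, Ne.symm hv]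

lemma count_remove_step (c : PySem.Dict Int Int) (y : Int) (s : List Int)
    (h : ∀ v, c.getD v 0 = (((y :: s) : List Int).count v : Int)) :
    ∀ v, (c.insert y (c.getD y 0 - 1)).getD v 0 = (s.count v : Int) := by
  intro v
  rw [PySem.Dict.getD_insert]
  by_cases hv : v = y
  · subst hv
    rw [h v]
    simp
  · rw [h v]
    simp [hv, Ne.symm hv]

-- invariant of A's inner loop after m steps, started at i
lemma innerA (nums : List Int) (k : Int) (i : Nat) (a0 : Int) :
    ∀ m, i + m ≤ nums.length →
    (∀ x, ((List.range m).foldl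
        (fun st (kk : Nat) => countGoodInner nums k st ((i : Int) + (kk : Int)))
        (PySem.Dict.empty, 0, a0)).1.getD x 0 = ((pvSeg nums i (i+m)).count x : Int)) ∧
    ((List.range m).foldl
        (fun st (kk : Nat) => countGoodInner nums k st ((i : Int) + (kk : Int)))
        (PySem.Dict.empty, 0, a0)).2.1 = pvPairs (pvSeg nums i (i+m)) ∧
    ((List.range m).foldl
        (fun st (kk : Nat) => countGoodInner nums k st ((i : Int) + (kk : Int)))
        (PySem.Dict.empty, 0, a0)).2.2 = a0 +
      (((List.range' i m).countP (fun r => decide (k ≤ pvPairs (pvSeg nums i (r+1))))) : Int) := by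
  intro m
  induction m with
  | zero =>
    intro _
    have hseg : pvSeg nums i i = [] := pvSeg_nil nums (Or.inr (by omega))
    refine ⟨?_, ?_, ?_⟩ <;> simp [hseg, pvPairs]
  | succ m ih =>
    intro hm
    obtain ⟨ihd, ihp, iha⟩ := ih (by omega)
    rw [List.range_succ, List.foldl_append, List.foldl_cons, List.foldl_nil]
    set st := (List.range m).foldl
        (fun st (kk : Nat) => countGoodInner nums k st ((i : Int) + (kk : Int)))
        (PySem.Dict.empty, 0, a0) with hst
    have hcast : ((i : Int) + (m : Int)) = ((i + m : Nat) : Int) := by push_cast; ring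
    have hx : PySem.List.pyGetD nums ((i : Int) + (m : Int)) 0 = nums.getD (i+m) 0 := by
      rw [hcast, PySem.List.pyGetD_natCast]
    have hseg : pvSeg nums i (i+(m+1)) = pvSeg nums i (i+m) ++ [nums.getD (i+m) 0] := by
      have : i + (m+1) = (i+m) + 1 := by omega
      rw [this]
      exact pvSeg_concat nums (by omega) (by omega)
    have hd : ∀ v, (countGoodInner nums k st ((i : Int) + (m : Int))).1.getD v 0
        = ((pvSeg nums i (i+(m+1))).count v : Int) := by
      intro v
      simp only [countGoodInner, hx, hseg]
      exact count_insert_step st.1 (pvSeg nums i (i+m)) (nums.getD (i+m) 0) ihd v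
    have hcx : ((countGoodInner nums k st ((i : Int) + (m : Int))).1.getD (nums.getD (i+m) 0) 0)
        = ((pvSeg nums i (i+m)).count (nums.getD (i+m) 0) : Int) + 1 := by
      rw [hd, hseg]
      simp [List.count_append]
    have hp : (countGoodInner nums k st ((i : Int) + (m : Int))).2.1
        = pvPairs (pvSeg nums i (i+(m+1))) := by
      show st.2.1 + (((st.1.insert (PySem.List.pyGetD nums ((i : Int) + (m : Int)) 0)
          (st.1.getD (PySem.List.pyGetD nums ((i : Int) + (m : Int)) 0) 0 + 1)).getD
          (PySem.List.pyGetD nums ((i : Int) + (m : Int)) 0) 0) - 1) = _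
      have := hcx
      simp only [countGoodInner, hx] at this ⊢
      rw [this, ihp, hseg, pvPairs_concat]
      ring
    refine ⟨hd, hp, ?_⟩
    show (if (countGoodInner nums k st ((i : Int) + (m : Int))).2.1 ≥ k then st.2.2 + 1 else st.2.2) = _
    rw [hp, iha]
    have hr' : List.range' i (m+1) = List.range' i m ++ [i + m] := by
      rw [List.range'_1_concat]
    rw [hr', List.countP_append]
    have : i + m + 1 = i + (m+1) := by omega
    simp only [List.countP_cons, List.countP_nil, this]
    by_cases hgood : k ≤ pvPairs (pvSeg nums i (i+(m+1)))
    · rw [if_pos hgood]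
      simp [hgood]
      ring
    · rw [if_neg hgood]
      simp [hgood]

lemma A_eq (nums : List Int) (k : Int) :
    countGood_brute nums k = pvSum nums k nums.length := by
  unfold countGood_brute
  dsimp only
  rw [PySem.List.len_eq, PySem.List.pyRange_one]
  simp only [sub_zero, Int.toNat_natCast, List.foldl_map, zero_add]
  rw [PySem.List.foldl_congr_mem _ _ (fun ans i => ans + pvGoodCnt nums k i) _ ?_]
  · rw [PySem.List.foldl_add]
    unfold pvSum
    ring
  · intro acc i hi
    rw [List.mem_range] at hi
    rw [PySem.List.pyRange_one]
    have ht : (((nums.length : Int)) - ((i : Nat) : Int)).toNat = nums.length - i := by omega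
    rw [ht, List.foldl_map]
    exact (innerA nums k i acc (nums.length - i) (by omega)).2.2

-- the while-loop invariant of B
def pvSP (nums : List Int) (k : Int) (r L : Nat)
    (st : PySem.Dict Int Int × Int × Int × Int) : Prop :=
  st.2.2.1 = (L : Int) ∧ L ≤ r + 1 ∧
  (∀ x, st.1.getD x 0 = ((pvSeg nums L (r+1)).count x : Int)) ∧
  st.2.1 = pvPairs (pvSeg nums L (r+1)) ∧
  (∀ j, L ≤ j → j < r → pvPairs (pvSeg nums L (j+1)) < k) ∧
  st.2.2.2 = pvSum nums k L

lemma shrinkB_spec (nums : List Int) (k : Int) {r : Nat} (hr : r < nums.length) :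
    ∀ (fuel : Nat) (L : Nat) st, pvSP nums k r L st → r + 1 - L < fuel →
    ∃ L', pvSP nums k r L'
        (shrinkB nums k (nums.length : Int) (r : Int) fuel st) ∧
      (pvPairs (pvSeg nums L' (r+1)) < k ∨ L' = r + 1) := by
  intro fuel
  induction fuel with
  | zero => intro L st _ hlt; omega
  | succ fuel ih =>
    intro L st hsp hlt
    obtain ⟨hleft, hLr1, hcnt, hpairs, hH, hans⟩ := hsp
    by_cases hc : st.2.1 ≥ k ∧ st.2.2.1 ≤ (r : Int)
    · have hLr : L ≤ r := by
        have := hc.2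
        rw [hleft] at this
        exact_mod_cast this
      have hLN : L < nums.length := by omega
      have hgood : k ≤ pvPairs (pvSeg nums L (r+1)) := by rw [← hpairs]; exact hc.1
      have hy : PySem.List.pyGetD nums st.2.2.1 0 = nums.getD L 0 := by
        rw [hleft, PySem.List.pyGetD_natCast]
      have hsegc : pvSeg nums L (r+1) = nums.getD L 0 :: pvSeg nums (L+1) (r+1) :=
        pvSeg_cons nums (by omega) hLN
      -- counts after decrement
      have hcnt' : ∀ v, (st.1.insert (nums.getD L 0) (st.1.getD (nums.getD L 0) 0 - 1)).getD v 0
          = ((pvSeg nums (L+1) (r+1)).count v : Int) := by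
        apply count_remove_step
        intro v
        rw [hcnt v, hsegc]
      have hcy : (st.1.insert (nums.getD L 0) (st.1.getD (nums.getD L 0) 0 - 1)).getD (nums.getD L 0) 0
          = ((pvSeg nums (L+1) (r+1)).count (nums.getD L 0) : Int) := hcnt' _
      have hpairs' : st.2.1 - ((st.1.insert (nums.getD L 0) (st.1.getD (nums.getD L 0) 0 - 1)).getD (nums.getD L 0) 0)
          = pvPairs (pvSeg nums (L+1) (r+1)) := by
        rw [hcy, hpairs, hsegc]
        simp only [pvPairs]
        ring
      have hans' : st.2.2.2 + ((nums.length : Int) - (r : Int)) = pvSum nums k (L+1) := by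
        rw [hans, pvSum_succ, pvGoodCnt_eq nums k hLr hr hgood hH]
      -- one unfolding step
      rw [shrinkB, if_pos hc]
      simp only [hy]
      apply ih (L+1)
      · refine ⟨by rw [hleft]; push_cast; ring, by omega, hcnt', hpairs', ?_, hans'⟩
        intro j hj1 hj2
        calc pvPairs (pvSeg nums (L+1) (j+1)) ≤ pvPairs (pvSeg nums L (j+1)) :=
              pvPairs_seg_anti nums (by omega)
          _ < k := hH j (by omega) hj2
      · omega
    · rw [shrinkB, if_neg hc]
      refine ⟨L, ⟨hleft, hLr1, hcnt, hpairs, hH, hans⟩, ?_⟩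
      by_cases hp : st.2.1 ≥ k
      · right
        have : ¬ st.2.2.1 ≤ (r : Int) := fun h => hc ⟨hp, h⟩
        rw [hleft] at this
        omega
      · left
        rw [← hpairs]
        omega

-- the outer-loop invariant of B after m steps
def pvOP (nums : List Int) (k : Int) (m L : Nat)
    (st : PySem.Dict Int Int × Int × Int × Int) : Prop :=
  st.2.2.1 = (L : Int) ∧ L ≤ m ∧
  (∀ x, st.1.getD x 0 = ((pvSeg nums L m).count x : Int)) ∧
  st.2.1 = pvPairs (pvSeg nums L m) ∧
  (∀ j, L ≤ j → j < m → pvPairs (pvSeg nums L (j+1)) < k) ∧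
  st.2.2.2 = pvSum nums k L

lemma outerB (nums : List Int) (k : Int) :
    ∀ m, m ≤ nums.length →
    ∃ L, pvOP nums k m L ((List.range m).foldl
      (fun st (kk : Nat) => bStep nums k st ((kk : Nat) : Int))
      (PySem.Dict.empty, 0, 0, 0)) := by
  intro m
  induction m with
  | zero =>
    intro _
    refine ⟨0, ?_, by omega, ?_, ?_, by omega, ?_⟩
    · simp
    · intro x
      rw [pvSeg_nil nums (Or.inr le_rfl)]
      simp
    · rw [pvSeg_nil nums (Or.inr le_rfl)]
      simp [pvPairs]
    · simp [pvSum]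
  | succ m ih =>
    intro hm1
    obtain ⟨L, hleft, hLm, hcnt, hpairs, hH, hans⟩ := ih (by omega)
    rw [List.range_succ, List.foldl_append, List.foldl_cons, List.foldl_nil]
    set st := (List.range m).foldl
      (fun st (kk : Nat) => bStep nums k st ((kk : Nat) : Int))
      (PySem.Dict.empty, 0, 0, 0) with hst
    have hmN : m < nums.length := by omega
    simp only [bStep, PySem.List.len_eq, Int.toNat_natCast, PySem.List.pyGetD_natCast]
    have hsegc : pvSeg nums L (m+1) = pvSeg nums L m ++ [nums.getD m 0] :=
      pvSeg_concat nums hLm hmN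
    have hcnt1 : ∀ v, (st.1.insert (nums.getD m 0) (st.1.getD (nums.getD m 0) 0 + 1)).getD v 0
        = ((pvSeg nums L (m+1)).count v : Int) := by
      intro v
      rw [hsegc]
      exact count_insert_step st.1 (pvSeg nums L m) (nums.getD m 0) hcnt v
    have hpairs1 : st.2.1 + st.1.getD (nums.getD m 0) 0 = pvPairs (pvSeg nums L (m+1)) := by
      rw [hpairs, hcnt (nums.getD m 0), hsegc, pvPairs_concat]
    obtain ⟨L', hsp', hexit⟩ := shrinkB_spec nums k hmN (nums.length + 1) L
      (st.1.insert (nums.getD m 0) (st.1.getD (nums.getD m 0) 0 + 1),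
        st.2.1 + st.1.getD (nums.getD m 0) 0, st.2.2.1, st.2.2.2)
      ⟨hleft, by omega, hcnt1, hpairs1, hH, hans⟩ (by omega)
    obtain ⟨hleft', hL'm, hcnt', hpairs', hH', hans'⟩ := hsp'
    refine ⟨L', hleft', hL'm, hcnt', hpairs', ?_, hans'⟩
    intro j hj1 hj2
    by_cases hjm : j < m
    · exact hH' j hj1 hjm
    · have hjm' : j = m := by omega
      subst hjm'
      rcases hexit with h | h
      · exact h
      · omega

lemma B_eq (nums : List Int) (k : Int) :
    countGood_brute_alt nums k = pvSum nums k nums.length := by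
  unfold countGood_brute_alt
  dsimp only
  rw [PySem.List.len_eq, PySem.List.pyRange_one]
  simp only [sub_zero, Int.toNat_natCast, List.foldl_map, zero_add]
  obtain ⟨L, hleft, hLN, hcnt, hpairs, hH, hans⟩ := outerB nums k nums.length le_rfl
  rw [hans]
  exact (pvSum_stable nums k hLN hH).symm

-- ===== VERDICT (by name: the statement is the Claim_ definition above) =====
theorem countGood_brute_spec : Claim_equal_countGood_brute := by
  intro nums k _
  show countGood_brute nums k = countGood_brute_alt nums k
  rw [A_eq, B_eq]
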